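-- pv_equiv track=rewrite | github.com/jrmat/COSC326 | Finding Anagrams/fa4.py | find
-- ===== SOURCE A (Python) =====
-- from collections import Counter
--
-- def find(w, dict):
--     target = Counter(w[0])
--
--     if target == Counter(dict[0]):
--         anagram = [dict[0]]
--         return anagram
--
--     for i in range(len(dict)):
--         t = target - Counter(dict[i])
--         anagram = check(t, dict, i)
--         if anagram is not None:
--             anagram.insert(0, dict[i])
--             return anagram
--
--     anagram = []  # returns empty list if no anagram found
--     return anagram
--
-- def check(target, d, i):
--     for j in range(i+1, len(d)):
--         c = Counter(d[j])
--         if c == target: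
--             a = [d[j]]
--             return a
--         if c & target == c:
--             rest = target - c
--             a = check(rest, d, j)
--             if a is not None:
--                 a.insert(0, d[j])
--                 return a
--     return None
-- ===== SOURCE B (Python) =====
-- from collections import Counter
--
-- def find(w, dict):
--     target = Counter(w[0])
--
--     if target == Counter(dict[0]):
--         anagram = [dict[0]]
--         return anagram
--
--     for i in range(len(dict)):
--         t = target - Counter(dict[i])
--         anagram = _search(t, dict, i)
--         if anagram is not None:
--             anagram.insert(0, dict[i])
--             return anagram
--
--     anagram = []
--     return anagram
--
-- def _search(target, d, i):
--     # iterative preorder DFS with an explicit stack of (remaining, next index, path prefix)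
--     stack = [(target, i + 1, [])]
--     while stack:
--         rem, j, path = stack.pop()
--         if j >= len(d):
--             continue
--         c = Counter(d[j])
--         if c == rem:
--             return path + [d[j]]
--         stack.append((rem, j + 1, path))
--         if c & rem == c:
--             stack.append((rem - c, j + 1, path + [d[j]]))
--     return None
-- ===== Notes on version B (the rewrite author's own statement) =====
-- stated objective: alternative
-- what changed: The recursive backtracking helper check is replaced by an iterative preorder DFS over an explicit stack of (remaining-counter, next-index, path-prefix) frames that assembles the result front-to-back instead of on the recursion's unwind; the find wrapper is kept byte-for-byte.
import Mathlib
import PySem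

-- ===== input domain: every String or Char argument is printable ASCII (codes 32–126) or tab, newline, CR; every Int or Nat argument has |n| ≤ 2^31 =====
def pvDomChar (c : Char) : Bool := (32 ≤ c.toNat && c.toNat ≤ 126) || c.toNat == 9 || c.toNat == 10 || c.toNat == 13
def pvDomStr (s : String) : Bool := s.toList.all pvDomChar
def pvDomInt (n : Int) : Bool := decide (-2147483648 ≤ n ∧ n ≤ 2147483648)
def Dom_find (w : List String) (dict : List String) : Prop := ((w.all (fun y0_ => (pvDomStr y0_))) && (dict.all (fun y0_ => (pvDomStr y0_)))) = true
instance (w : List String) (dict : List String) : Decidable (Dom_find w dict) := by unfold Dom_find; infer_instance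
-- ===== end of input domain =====

-- B replaces the recursive backtracking `check` with an explicit-stack iterative DFS (same preorder, same first result); alternative decomposition, same cost.


-- ===== PORT A =====
-- collections.Counter over a string's characters, modelled exactly as the sorted list
-- of its characters (a canonical multiset): Counter equality = list equality, Counter
-- subtraction (truncated, positive counts kept) = List.diff, `c & t` (min of counts,
-- positive kept) = c.diff (c.diff t).
def cnt (s : String) : List Char := s.toList.mergeSort (fun a b => a ≤ b)
def csub (a b : List Char) : List Char := a.diff b
def cinter (a b : List Char) : List Char := a.diff (a.diff b)

-- Python `check(target, d, i)` loops j = i+1 … len(d)-1; here `checkA target d j`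
-- is that loop with the current index j explicit (call sites pass i+1).
def checkA (target : List Char) (d : List String) (j : Nat) : Option (List String) :=
  if h : j < d.length then
    if cnt d[j] = target then some [d[j]]
    else if cinter (cnt d[j]) target = cnt d[j] then
      match checkA (csub target (cnt d[j])) d (j + 1) with
      | some a => some (d[j] :: a)
      | none => checkA target d (j + 1)
    else checkA target d (j + 1)
  else none
termination_by d.length - j

-- the `for i in range(len(dict))` loop of Python `find`
def findLoop (target : List Char) (dict : List String) (i : Nat) : List String :=
  if h : i < dict.length then
    match checkA (csub target (cnt dict[i])) dict (i + 1) with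
    | some a => dict[i] :: a
    | none => findLoop target dict (i + 1)
  else []
termination_by dict.length - i

def find (w : List String) (dict : List String) : List String :=
  match w, dict with
  | w0 :: _, d0 :: ds =>
    if cnt w0 = cnt d0 then [d0]
    else findLoop (cnt w0) (d0 :: ds) 0
  | _, _ => []   -- Python raises IndexError here (excluded by Pre_find)

-- ===== PORT B =====
-- B-side copies of the Counter model (kept separate from A's helpers)
def cntB (s : String) : List Char := s.toList.mergeSort (fun a b => a ≤ b)
def csubB (a b : List Char) : List Char := a.diff b
def cinterB (a b : List Char) : List Char := a.diff (a.diff b)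

-- weight of a DFS stack, used only for termination of checkB
def stackWeight (n : Nat) : List (List Char × Nat × List String) → Nat
  | [] => 0
  | f :: s => 3 ^ (n - f.2.1) + stackWeight n s

theorem pow3_split {n j : Nat} (h : j < n) : 3 ^ (n - j) = 3 * 3 ^ (n - (j + 1)) := by
  have he : n - j = (n - (j + 1)) + 1 := by omega
  rw [he, pow_succ, Nat.mul_comm]

-- Python `_search`: explicit-stack iterative DFS over frames (remaining, next j, path)
def checkB (d : List String) (stack : List (List Char × Nat × List String)) :
    Option (List String) :=
  match stack with
  | [] => none
  | (rem, j, path) :: rest =>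
    if h : j < d.length then
      if cntB d[j] = rem then some (path ++ [d[j]])
      else if cinterB (cntB d[j]) rem = cntB d[j] then
        checkB d ((csubB rem (cntB d[j]), j + 1, path ++ [d[j]]) :: (rem, j + 1, path) :: rest)
      else checkB d ((rem, j + 1, path) :: rest)
    else checkB d rest
termination_by stackWeight d.length stack
decreasing_by
  · have h3 := pow3_split h
    have hp : 0 < 3 ^ (d.length - (j + 1)) := Nat.pow_pos (by norm_num)
    simp [stackWeight]; omega
  · have h3 := pow3_split h
    have hp : 0 < 3 ^ (d.length - (j + 1)) := Nat.pow_pos (by norm_num)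
    simp [stackWeight]; omega
  · have _hp : 0 < 3 ^ (d.length - j) := Nat.pow_pos (by norm_num)
    simp [stackWeight]

def findLoopB (target : List Char) (dict : List String) (i : Nat) : List String :=
  if h : i < dict.length then
    match checkB dict [(csubB target (cntB dict[i]), i + 1, [])] with
    | none => findLoopB target dict (i + 1)
    | some a => dict[i] :: a
  else []
termination_by dict.length - i

def find_alt (w : List String) (dict : List String) : List String :=
  match dict with
  | [] => []   -- Python raises IndexError here (excluded by Pre_find)
  | d0 :: ds =>
    match w with
    | [] => []   -- Python raises IndexError here (excluded by Pre_find)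
    | w0 :: _ =>
      if cntB w0 = cntB d0 then [d0]
      else findLoopB (cntB w0) (d0 :: ds) 0

-- ===== PRECONDITION & SPEC =====
-- Pre_ excludes empty w or dict, on which Python A raises IndexError at w[0]/dict[0] (B raises there too).
def Pre_find (w : List String) (dict : List String) : Prop := w ≠ [] ∧ dict ≠ []
instance (w : List String) (dict : List String) : Decidable (Pre_find w dict) := by
  unfold Pre_find; infer_instance
def pvWitness_find : List String × List String := (["ab"], ["b", "a"])

def Spec_find (w : List String) (dict : List String) (out : List String) : Prop :=
  out = find_alt w dict
instance (w : List String) (dict : List String) (out : List String) :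
    Decidable (Spec_find w dict out) := by unfold Spec_find; infer_instance

-- ===== CLAIM (what is proved, stated in full; the proofs are below) =====
def Claim_equal_find : Prop := ∀ (w : List String) (dict : List String),
  Dom_find w dict → Pre_find w dict → Spec_find w dict (find w dict)

-- ===== LEMMAS AND PROOFS =====
theorem cntB_eq : cntB = cnt := rfl
theorem csubB_eq : csubB = csub := rfl
theorem cinterB_eq : cinterB = cinter := rfl

-- The iterative DFS on a stack with top frame (rem, j, path) returns path ++ (first
-- result of the recursive search from j), falling back to the rest of the stack.
theorem checkB_frame (d : List String) :
    ∀ (N : Nat) (stack : List (List Char × Nat × List String))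
      (rem : List Char) (j : Nat) (path : List String),
      stackWeight d.length ((rem, j, path) :: stack) ≤ N →
      checkB d ((rem, j, path) :: stack) =
        (match checkA rem d j with
         | some a => some (path ++ a)
         | none => checkB d stack) := by
  intro N
  induction N with
  | zero =>
    intro stack rem j path hW
    exfalso
    have hp : 0 < 3 ^ (d.length - j) := Nat.pow_pos (by norm_num)
    simp [stackWeight] at hW
  | succ N ih =>
    intro stack rem j path hW
    rw [checkB, checkA]
    simp only [cntB_eq, csubB_eq, cinterB_eq]
    by_cases h : j < d.length
    · simp only [h, dif_pos]
      by_cases he : cnt d[j] = rem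
      · simp [he]
      · simp only [he, if_neg, not_false_iff]
        by_cases hs : cinter (cnt d[j]) rem = cnt d[j]
        · simp only [hs, if_pos]
          have h3 := pow3_split (n := d.length) h
          have hp : 0 < 3 ^ (d.length - (j + 1)) := Nat.pow_pos (by norm_num)
          simp only [stackWeight] at hW
          have hW1 : stackWeight d.length
              ((csub rem (cnt d[j]), j + 1, path ++ [d[j]]) :: (rem, j + 1, path) :: stack) ≤ N := by
            simp only [stackWeight]; omega
          have hW2 : stackWeight d.length ((rem, j + 1, path) :: stack) ≤ N := by
            simp only [stackWeight]; omega
          rw [ih _ _ _ _ hW1, ih _ _ _ _ hW2]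
          cases checkA (csub rem (cnt d[j])) d (j + 1) with
          | some a => simp
          | none =>
            cases checkA rem d (j + 1) with
            | some a => simp
            | none => simp
        · simp only [hs, if_neg, not_false_iff]
          have h3 := pow3_split (n := d.length) h
          have hp : 0 < 3 ^ (d.length - (j + 1)) := Nat.pow_pos (by norm_num)
          simp only [stackWeight] at hW
          have hW2 : stackWeight d.length ((rem, j + 1, path) :: stack) ≤ N := by
            simp only [stackWeight]; omega
          rw [ih _ _ _ _ hW2]
    · simp [h]

-- Python check(t, d, i) (= checkA t d (i+1)) equals B's _search run on a singleton stack.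
theorem checkB_single (d : List String) (t : List Char) (j : Nat) :
    checkB d [(t, j, [])] = checkA t d j := by
  rw [checkB_frame d (stackWeight d.length [(t, j, [])]) [] t j [] le_rfl]
  cases checkA t d j with
  | some a => simp
  | none => simp [checkB]

theorem findLoopB_eq (target : List Char) (dict : List String) :
    ∀ (k i : Nat), dict.length - i ≤ k → findLoopB target dict i = findLoop target dict i := by
  intro k
  induction k with
  | zero =>
    intro i hk
    rw [findLoopB, findLoop]
    simp only [cntB_eq, csubB_eq]
    have : ¬ i < dict.length := by omega
    simp [this]
  | succ k ih =>
    intro i hk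
    rw [findLoopB, findLoop]
    simp only [cntB_eq, csubB_eq]
    by_cases h : i < dict.length
    · simp only [h, dif_pos, checkB_single]
      cases checkA (csub target (cnt dict[i])) dict (i + 1) with
      | some a => simp
      | none => simp only; exact ih (i + 1) (by omega)
    · simp [h]

-- ===== VERDICT (by name: the statement is the Claim_ definition above) =====
theorem find_spec : Claim_equal_find := by
  intro w dict _ _
  unfold Spec_find find find_alt
  simp only [cntB_eq]
  match w, dict with
  | [], [] => rfl
  | [], _ :: _ => rfl
  | _ :: _, [] => rfl
  | w0 :: ws, d0 :: ds =>
    by_cases h : cnt w0 = cnt d0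
    · simp [h]
    · simp only [h, if_neg, not_false_iff]
      exact (findLoopB_eq _ _ ((d0 :: ds).length) 0 (by omega)).symm
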